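-- pv_equiv track=rewrite | github.com/olivier-riverain/advent-of-code-2024 | days/adventofcode09.py | findPosRight
-- ===== SOURCE A (Python) =====
-- def findPosRight(idFile, block):
--     posRight = -1
--     sizeBlock = len(block)
--     for i in range(len(block)):
--         if block[sizeBlock-1-i] == str(idFile):
--             posRight = sizeBlock-1-i
--             return posRight
--     return posRight
-- ===== SOURCE B (Python) =====
-- def findPosRight(idFile, block):
--     target = str(idFile)
--     posRight = -1
--     for i, s in enumerate(block):
--         if s == target:
--             posRight = i
--     return posRight
-- ===== Notes on version B (the rewrite author's own statement) =====
-- stated objective: simpler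
-- what changed: Replaces the reverse scan with early return (indexing block[sizeBlock-1-i]) by a plain forward enumerate pass that keeps the last matching index, computing str(idFile) once.
import Mathlib
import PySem

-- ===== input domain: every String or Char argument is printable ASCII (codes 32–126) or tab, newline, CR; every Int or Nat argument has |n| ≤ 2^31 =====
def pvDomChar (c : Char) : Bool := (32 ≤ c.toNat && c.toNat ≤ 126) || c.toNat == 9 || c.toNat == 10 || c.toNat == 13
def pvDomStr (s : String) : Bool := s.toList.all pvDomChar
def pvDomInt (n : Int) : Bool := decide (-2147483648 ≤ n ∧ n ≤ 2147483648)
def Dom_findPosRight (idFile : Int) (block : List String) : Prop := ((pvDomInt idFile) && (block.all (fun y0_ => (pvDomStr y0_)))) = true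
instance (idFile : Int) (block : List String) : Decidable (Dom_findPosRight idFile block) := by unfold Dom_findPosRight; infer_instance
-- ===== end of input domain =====

-- B replaces A's reverse scan with early return by a forward enumerate pass keeping the last match (simpler; str(idFile) computed once).

-- ===== PORT A =====
-- A's loop over i in range(len(block)), checking block[sizeBlock-1-i] and returning on first match.
-- The index sizeBlock-1-i is always in range for i in the loop, so pyGetD is exact here.
def findPosRightGo (target : String) (block : List String) (sizeBlock : Int) : List Int → Int
  | [] => -1
  | i :: rest =>
      if PySem.List.pyGetD block (sizeBlock - 1 - i) "" = target then sizeBlock - 1 - i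
      else findPosRightGo target block sizeBlock rest

def findPosRight (idFile : Int) (block : List String) : Int :=
  let sizeBlock : Int := block.length
  findPosRightGo (PySem.Int.toStr idFile) block sizeBlock (PySem.List.pyRange 0 block.length 1)

-- ===== PORT B =====
def findPosRight_alt (idFile : Int) (block : List String) : Int :=
  let target := PySem.Int.toStr idFile
  (PySem.List.enumerate block 0).foldl
    (fun posRight p => if p.2 = target then p.1 else posRight) (-1)

-- ===== PRECONDITION & SPEC =====
def Spec_findPosRight (idFile : Int) (block : List String) (out : Int) : Prop := out = findPosRight_alt idFile block
instance (idFile : Int) (block : List String) (out : Int) : Decidable (Spec_findPosRight idFile block out) := by unfold Spec_findPosRight; infer_instance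

-- ===== CLAIM (what is proved, stated in full; the proofs are below) =====
def Claim_equal_findPosRight : Prop := ∀ (idFile : Int) (block : List String), Dom_findPosRight idFile block → Spec_findPosRight idFile block (findPosRight idFile block)

-- ===== LEMMAS AND PROOFS =====

-- first match (by index pair) in a list of (index, string) pairs, with default a
def fmatch (t : String) (a : Int) : List (Int × String) → Int
  | [] => a
  | p :: r => if p.2 = t then p.1 else fmatch t a r

theorem fmatch_append_singleton (t : String) (a : Int) (M : List (Int × String)) (p : Int × String) :
    fmatch t a (M ++ [p]) = fmatch t (if p.2 = t then p.1 else a) M := by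
  induction M with
  | nil => simp [fmatch]
  | cons q M ih => simp [fmatch, ih]

theorem foldl_eq_fmatch_reverse (t : String) (a : Int) (L : List (Int × String)) :
    L.foldl (fun posRight p => if p.2 = t then p.1 else posRight) a = fmatch t a L.reverse := by
  induction L generalizing a with
  | nil => simp [fmatch]
  | cons p L ih => simp [List.foldl_cons, ih, fmatch_append_singleton]

theorem getElem?_enumerate (xs : List String) (s : Int) (k : Nat) :
    (PySem.List.enumerate xs s)[k]? = (xs[k]?).map (fun v => (s + (k : Int), v)) := by
  induction xs generalizing s k with
  | nil => simp [PySem.List.enumerate_nil]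
  | cons x xs ih =>
    rw [PySem.List.enumerate_cons]
    cases k with
    | zero => simp
    | succ k =>
      simp only [List.getElem?_cons_succ, ih (s + 1) k]
      cases xs[k]? <;> simp <;> ring_nf

theorem goA_eq_fmatch (t : String) (block : List String) :
    ∀ (m j : Nat), j + m = block.length →
      findPosRightGo t block (block.length : Int) (PySem.List.pyRange (j : Int) (block.length : Int) 1)
        = fmatch t (-1) ((PySem.List.enumerate block 0).take m).reverse := by
  intro m
  induction m with
  | zero =>
    intro j hj
    rw [PySem.List.pyRange_one_eq_nil (by omega)]
    simp [findPosRightGo, fmatch]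
  | succ m ih =>
    intro j hj
    have hjlt : (j : Int) < (block.length : Int) := by omega
    rw [PySem.List.pyRange_one_cons hjlt]
    show (if PySem.List.pyGetD block ((block.length : Int) - 1 - j) "" = t then
            (block.length : Int) - 1 - j
          else findPosRightGo t block (block.length : Int)
            (PySem.List.pyRange ((j : Int) + 1) (block.length : Int) 1)) = _
    have hm : m < block.length := by omega
    have hme : m < (PySem.List.enumerate block 0).length := by
      simp [PySem.List.length_enumerate, hm]
    have htake : (PySem.List.enumerate block 0).take (m + 1)
        = (PySem.List.enumerate block 0).take m ++ [((m : Int), block[m])] := by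
      rw [List.take_add_one]
      congr 1
      have := getElem?_enumerate block 0 m
      rw [List.getElem?_eq_getElem hm] at this
      rw [List.getElem?_eq_getElem hme] at this
      simp only [Option.map_some] at this
      simp [this]
    rw [htake, List.reverse_append]
    simp only [List.reverse_singleton, List.singleton_append, fmatch]
    have hidx : (block.length : Int) - 1 - j = (m : Int) := by omega
    rw [hidx]
    have hget : PySem.List.pyGetD block ((m : Int)) "" = block[m] := by
      rw [PySem.List.pyGetD_natCast]
      simp [List.getD, List.getElem?_eq_getElem hm]
    rw [hget]
    by_cases hb : block[m] = t
    · simp [hb]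
    · simp only [hb, if_false]
      have hcast : ((j : Int) + 1) = ((j + 1 : Nat) : Int) := by push_cast; ring
      rw [hcast]
      exact ih (j + 1) (by omega)

theorem findPosRight_eq_alt (idFile : Int) (block : List String) :
    findPosRight idFile block = findPosRight_alt idFile block := by
  unfold findPosRight findPosRight_alt
  rw [foldl_eq_fmatch_reverse]
  have h := goA_eq_fmatch (PySem.Int.toStr idFile) block block.length 0 (by omega)
  simpa [List.take_of_length_le, PySem.List.length_enumerate] using h

-- ===== VERDICT (by name: the statement is the Claim_ definition above) =====
theorem findPosRight_spec : Claim_equal_findPosRight := by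
  intro idFile block _
  unfold Spec_findPosRight
  exact findPosRight_eq_alt idFile block
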